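-- pv_equiv track=rewrite | github.com/websetpro-blip/KeySet-MVP | services/wordstat_multiparser.py | _split_phrases
-- ===== SOURCE A (Python) =====
-- def _split_phrases(phrases: list[str], slots: int) -> list[list[str]]:
--     if slots <= 0:
--         return []
--     total = len(phrases)
--     if total == 0:
--         return [[] for _ in range(slots)]
--     base = total // slots
--     remainder = total % slots
--     batches: list[list[str]] = []
--     start = 0
--     for idx in range(slots):
--         extra = 1 if idx < remainder else 0
--         end = start + base + extra
--         batches.append(phrases[start:end])
--         start = end
--     return batches
-- ===== SOURCE B (Python) =====
-- def _split_phrases(phrases: list[str], slots: int) -> list[list[str]]: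
--     # Bucket distribution: instead of slicing contiguous chunks, iterate over the
--     # ELEMENTS, compute each element's owning slot by closed-form arithmetic
--     # (the first `rem` slots hold base+1 elements, so element j belongs to slot
--     # j // (base+1) if it falls in the big region, else rem + (j - big) // base),
--     # and append it to that bucket.
--     if slots <= 0:
--         return []
--     base, rem = divmod(len(phrases), slots)
--     big = rem * (base + 1)
--     batches: list[list[str]] = [[] for _ in range(slots)]
--     for j, p in enumerate(phrases):
--         i = j // (base + 1) if j < big else rem + (j - big) // base
--         batches[i].append(p)
--     return batches
-- ===== Notes on version B (the rewrite author's own statement) =====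
-- stated objective: alternative
-- what changed: Replaces A's chunk-slicing loop (start/end index accumulation, one slice per slot) with a bucket distribution: a single pass over the elements computes each element's owning slot by closed-form arithmetic and appends it to that pre-allocated bucket; no slicing and no running start index.
import Mathlib
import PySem

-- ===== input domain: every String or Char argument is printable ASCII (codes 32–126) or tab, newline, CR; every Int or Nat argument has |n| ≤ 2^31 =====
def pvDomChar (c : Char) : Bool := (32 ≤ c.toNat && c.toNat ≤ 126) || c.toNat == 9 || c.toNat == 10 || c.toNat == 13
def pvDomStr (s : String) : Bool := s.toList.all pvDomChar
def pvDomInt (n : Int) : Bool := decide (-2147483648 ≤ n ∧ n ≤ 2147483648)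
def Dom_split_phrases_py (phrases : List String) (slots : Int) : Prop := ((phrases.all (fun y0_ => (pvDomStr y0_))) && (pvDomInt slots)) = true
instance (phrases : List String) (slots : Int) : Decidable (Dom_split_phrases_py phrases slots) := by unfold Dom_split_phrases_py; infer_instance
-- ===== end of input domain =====

-- B replaces A's chunk-slicing loop by a bucket distribution: one pass over the elements,
-- each element's owning slot computed by closed-form arithmetic, appended to a pre-allocated
-- bucket (objective: alternative).

-- ===== PORT A =====
def split_phrases_py (phrases : List String) (slots : Int) : List (List String) :=
  if slots ≤ 0 then []
  else
    let total : Int := phrases.length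
    if total = 0 then (PySem.List.pyRange 0 slots 1).map (fun _ => ([] : List String))
    else
      let base := PySem.Int.floordiv total slots
      let remainder := PySem.Int.mod total slots
      ((PySem.List.pyRange 0 slots 1).foldl
        (fun (st : List (List String) × Int) idx =>
          let extra : Int := if idx < remainder then 1 else 0
          let e := st.2 + base + extra
          (st.1 ++ [PySem.List.slice phrases (some st.2) (some e)], e))
        (([] : List (List String)), (0 : Int))).1

-- ===== PORT B =====
-- Source B's loop: for j, p in enumerate(phrases): batches[i].append(p) with i the computed
-- bucket index; i always satisfies 0 ≤ i < slots, so batches[i] is 'modify i.toNat' here.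
def split_phrases_py_alt (phrases : List String) (slots : Int) : List (List String) :=
  if slots ≤ 0 then []
  else
    let base := PySem.Int.floordiv (phrases.length : Int) slots
    let rem := PySem.Int.mod (phrases.length : Int) slots
    let big := rem * (base + 1)
    (PySem.List.enumerate phrases).foldl
      (fun batches jp =>
        let i : Int := if jp.1 < big then PySem.Int.floordiv jp.1 (base + 1)
                       else rem + PySem.Int.floordiv (jp.1 - big) base
        batches.modify i.toNat (fun b => b ++ [jp.2]))
      ((PySem.List.pyRange 0 slots 1).map (fun _ => ([] : List String)))

-- ===== PRECONDITION & SPEC =====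
def Spec_split_phrases_py (phrases : List String) (slots : Int) (out : List (List String)) : Prop := out = split_phrases_py_alt phrases slots
instance (phrases : List String) (slots : Int) (out : List (List String)) : Decidable (Spec_split_phrases_py phrases slots out) := by unfold Spec_split_phrases_py; infer_instance

-- ===== CLAIM (what is proved, stated in full; the proofs are below) =====
def Claim_equal_split_phrases_py : Prop := ∀ (phrases : List String) (slots : Int), Dom_split_phrases_py phrases slots → Spec_split_phrases_py phrases slots (split_phrases_py phrases slots)

-- ===== LEMMAS AND PROOFS =====

-- common characterisation: batch i is the slice [pvOff n s i, pvOff n s (i+1)) of xs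
def pvOff (n s i : Nat) : Nat := i * (n / s) + min i (n % s)

def pvSpec (xs : List String) (s : Nat) : List (List String) :=
  (List.range s).map (fun i =>
    (xs.drop (pvOff xs.length s i)).take (pvOff xs.length s (i+1) - pvOff xs.length s i))

-- ---- A = pvSpec ----

theorem pvAfold (xs : List String) (s : Nat) (k : Nat) :
    (((List.range k).map (fun (i : Nat) => (Int.ofNat i))).foldl
      (fun (st : List (List String) × Int) idx =>
        (st.1 ++ [PySem.List.slice xs (some st.2)
          (some (st.2 + ((xs.length / s : Nat) : Int) + (if idx < ((xs.length % s : Nat) : Int) then 1 else 0)))],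
         st.2 + ((xs.length / s : Nat) : Int) + (if idx < ((xs.length % s : Nat) : Int) then 1 else 0)))
      (([] : List (List String)), (0 : Int)))
    = ((List.range k).map (fun i =>
        PySem.List.slice xs (some ((pvOff xs.length s i : Nat) : Int)) (some ((pvOff xs.length s (i+1) : Nat) : Int))),
       ((pvOff xs.length s k : Nat) : Int)) := by
  induction k with
  | zero => simp [pvOff]
  | succ k ih =>
    rw [List.range_succ]
    rw [List.map_append, List.foldl_append, ih]
    simp only [List.map_cons, List.map_nil, List.foldl_cons, List.foldl_nil]
    have hcond : ((Int.ofNat k) < ((xs.length % s : Nat) : Int)) ↔ k < xs.length % s := by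
      rw [Int.ofNat_eq_natCast]
      omega
    have hoff : ∀ (c : Prop) [Decidable c], (c ↔ k < xs.length % s) →
        ((pvOff xs.length s k : Nat) : Int) + ((xs.length / s : Nat) : Int) + (if c then 1 else 0)
          = ((pvOff xs.length s (k+1) : Nat) : Int) := by
      intro c _ hc
      by_cases h : k < xs.length % s
      · rw [if_pos (hc.mpr h)]
        have : pvOff xs.length s (k+1) = pvOff xs.length s k + xs.length / s + 1 := by
          unfold pvOff
          have e1 : (k+1) * (xs.length / s) = k * (xs.length / s) + xs.length / s := by ring
          omega
        rw [this]; push_cast; ring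
      · rw [if_neg (fun hh => h (hc.mp hh))]
        have : pvOff xs.length s (k+1) = pvOff xs.length s k + xs.length / s := by
          unfold pvOff
          have e1 : (k+1) * (xs.length / s) = k * (xs.length / s) + xs.length / s := by ring
          omega
        rw [this]; push_cast; ring
    rw [List.map_append]
    simp only [Prod.mk.injEq]
    constructor
    · simp only [List.map_cons, List.map_nil]
      congr 2
      rw [hoff _ hcond]
    · exact hoff _ hcond

theorem pvA_eq_spec' (xs : List String) (s : Nat) (hs : 0 < s) :
    split_phrases_py xs (s : Int) = pvSpec xs s := by
  have hns : ¬ ((s:Int) ≤ 0) := by omega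
  simp only [split_phrases_py, if_neg hns]
  by_cases hz : xs.length = 0
  · rw [if_pos (by exact_mod_cast hz)]
    have hxs : xs = [] := List.eq_nil_of_length_eq_zero hz
    subst hxs
    simp [pvSpec, PySem.List.pyRange_one, pvOff, Function.comp_def, List.map_const']
  · rw [if_neg (by exact_mod_cast hz)]
    have hrange : PySem.List.pyRange 0 (s:Int) 1 = (List.range s).map (fun i => Int.ofNat i) := by
      rw [PySem.List.pyRange_one]
      simp [Int.ofNat_eq_natCast]
    rw [hrange]
    simp only [PySem.Int.floordiv_natCast, PySem.Int.mod_natCast]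
    rw [pvAfold xs s s]
    unfold pvSpec
    apply List.map_congr_left
    intro i _
    rw [PySem.List.slice_natCast]

-- ---- B = pvSpec ----

-- the fold that distributes elements into buckets, characterised per bucket
theorem pvFoldModify_len (f : Nat → Nat) (l : List (String × Nat)) (init : List (List String)) :
    (l.foldl (fun bs xp => bs.modify (f xp.2) (fun b => b ++ [xp.1])) init).length = init.length := by
  induction l generalizing init with
  | nil => rfl
  | cons xp l ih => simpa [List.foldl_cons] using ih (init.modify (f xp.2) (fun b => b ++ [xp.1]))

theorem pvFoldModify (f : Nat → Nat) (l : List (String × Nat)) (init : List (List String))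
    (i : Nat) (h : i < init.length) :
    (l.foldl (fun bs xp => bs.modify (f xp.2) (fun b => b ++ [xp.1])) init)[i]'(by
        rw [pvFoldModify_len]; exact h)
      = init[i] ++ (l.filter (fun xp => f xp.2 == i)).map Prod.fst := by
  induction l generalizing init with
  | nil => simp
  | cons xp l ih =>
    simp only [List.foldl_cons, List.filter_cons]
    have h' : i < (init.modify (f xp.2) (fun b => b ++ [xp.1])).length := by
      rwa [List.length_modify]
    rw [ih (init.modify (f xp.2) (fun b => b ++ [xp.1])) h']
    rw [List.getElem_modify]
    by_cases he : f xp.2 = i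
    · simp [he]
    · simp [he, beq_iff_eq]

-- filter of an index interval on zipIdx is a drop/take
theorem pvZipIdxFilter (xs : List String) : ∀ (k a b : Nat),
    (((xs.zipIdx k).filter (fun xp => decide (a ≤ xp.2) && decide (xp.2 < b))).map Prod.fst)
      = (xs.drop (a - k)).take (b - max a k) := by
  induction xs with
  | nil => simp
  | cons x xs ih =>
    intro k a b
    rw [List.zipIdx_cons, List.filter_cons]
    by_cases h1 : a ≤ k
    · by_cases h2 : k < b
      · have ha : a - k = 0 := by omega
        have hb : b - max a k = (b - max a (k+1)) + 1 := by omega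
        simp only [h1, h2, decide_true, Bool.and_self, ha, hb, List.drop_zero, List.take_succ_cons,
          if_true, List.map_cons]
        have ha' : a - (k+1) = 0 := by omega
        rw [ih (k+1) a b, ha', List.drop_zero]
      · have hb : b - max a k = 0 := by omega
        have hb' : b - max a (k+1) = 0 := by omega
        simp only [h2, decide_false, Bool.and_false, hb, List.take_zero, Bool.false_eq_true,
          if_false]
        rw [ih (k+1) a b, hb', List.take_zero]
    · have ha : a - k = (a - (k+1)) + 1 := by omega
      have hm : max a (k+1) = max a k := by omega
      simp only [h1, decide_false, Bool.false_and, ha, List.drop_succ_cons, Bool.false_eq_true,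
        if_false]
      rw [ih (k+1) a b, hm]

-- the closed-form bucket index of element j (Nat version of Source B's arithmetic)
def pvF (n s j : Nat) : Nat :=
  if j < n % s * (n / s + 1) then j / (n / s + 1)
  else n % s + (j - n % s * (n / s + 1)) / (n / s)

-- the bucket index targets exactly the interval [pvOff n s i, pvOff n s (i+1))
theorem pvBucket (n s j i : Nat) (hs : 0 < s) (hj : j < n) (hi : i < s) :
    (pvF n s j = i) ↔ (pvOff n s i ≤ j ∧ j < pvOff n s (i+1)) := by
  unfold pvF
  set b := n / s with hb
  set r := n % s with hr
  have hdm : s * b + r = n := Nat.div_add_mod n s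
  have hrs : r < s := Nat.mod_lt _ hs
  have hoff : ∀ m, pvOff n s m = m * b + min m r := fun m => rfl
  by_cases hA : j < r * (b + 1)
  · rw [if_pos hA]
    have hq1 : (j / (b+1)) * (b+1) ≤ j := Nat.div_mul_le_self j (b+1)
    have hq2 : j < (j / (b+1) + 1) * (b+1) := by
      have h1 := Nat.div_add_mod j (b+1)
      have h2 : j % (b+1) < b+1 := Nat.mod_lt j (Nat.succ_pos b)
      have h3 : (j/(b+1)+1) * (b+1) = (b+1) * (j/(b+1)) + (b+1) := by ring
      omega
    have hqr : j / (b+1) < r := Nat.div_lt_of_lt_mul (by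
      have : j < r * (b+1) := hA
      linarith [Nat.mul_comm r (b+1)])
    constructor
    · rintro rfl
      rw [hoff, hoff]
      have hmin1 : min (j/(b+1)) r = j/(b+1) := by omega
      have hmin2 : min (j/(b+1)+1) r = j/(b+1)+1 := by omega
      have e1 : (j/(b+1)) * (b+1) = (j/(b+1)) * b + j/(b+1) := by ring
      have e2 : (j/(b+1)+1) * (b+1) = (j/(b+1)+1) * b + (j/(b+1)+1) := by ring
      have e3 : (j/(b+1)+1) * b = (j/(b+1)) * b + b := by ring
      omega
    · rintro ⟨hlo, hhi⟩
      -- i < r, else pvOff n s i ≥ r*(b+1) > j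
      have hir : i < r := by
        by_contra hge
        have : r * (b+1) ≤ pvOff n s i := by
          rw [hoff]
          have hmin : min i r = r := by omega
          have e1 : r * (b+1) = r * b + r := by ring
          have e2 : r * b ≤ i * b := Nat.mul_le_mul_right b (by omega)
          omega
        omega
      apply Nat.div_eq_of_lt_le
      · rw [hoff] at hlo
        have hmin : min i r = i := by omega
        have e1 : i * (b+1) = i * b + i := by ring
        omega
      · rw [hoff] at hhi
        have hmin : min (i+1) r = i+1 := by omega
        have e1 : (i+1) * (b+1) = (i+1) * b + (i+1) := by ring
        have e2 : (i+1) * b = i * b + b := by ring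
        omega
  · rw [if_neg hA]
    have hbig : r * (b+1) ≤ j := by omega
    have hb0 : 0 < b := by
      rcases Nat.eq_zero_or_pos b with hb' | hb'
      · exfalso; rw [hb'] at hdm hbig; omega
      · exact hb'
    set m := j - r * (b+1) with hm
    have hq1 : (m / b) * b ≤ m := Nat.div_mul_le_self m b
    have hq2 : m < (m / b + 1) * b := by
      have h1 := Nat.div_add_mod m b
      have h2 := Nat.mod_lt m hb0
      have h3 : (m/b+1) * b = b * (m/b) + b := by ring
      omega
    constructor
    · rintro rfl
      rw [hoff, hoff]
      have hmin1 : min (r + m / b) r = r := Nat.min_eq_right (Nat.le_add_right r (m / b))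
      have hmin2 : min (r + m / b + 1) r = r :=
        Nat.min_eq_right (le_trans (Nat.le_add_right r (m / b)) (Nat.le_succ _))
      have e0 : r * (b+1) = r * b + r := by ring
      have e1 : (r + m / b) * b = r * b + (m / b) * b := by ring
      have e2 : (r + m / b + 1) * b = r * b + (m / b) * b + b := by ring
      have e3 : (m/b+1) * b = (m/b) * b + b := by ring
      omega
    · rintro ⟨hlo, hhi⟩
      have hir : r ≤ i := by
        by_contra hlt
        have : pvOff n s (i+1) ≤ r * (b+1) := by
          rw [hoff]
          have hmin : min (i+1) r = i+1 := by omega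
          have e1 : (i+1) * (b+1) = (i+1) * b + (i+1) := by ring
          have e2 : (i+1) * b ≤ r * b := Nat.mul_le_mul_right b (by omega)
          have e3 : r * (b+1) = r * b + r := by ring
          omega
        omega
      have hdiv : m / b = i - r := by
        apply Nat.div_eq_of_lt_le
        · rw [hoff] at hlo
          have hmin : min i r = r := by omega
          have e0 : r * (b+1) = r * b + r := by ring
          have e1 : (i - r) * b + r * b = i * b := by
            have : (i - r) + r = i := by omega
            calc (i - r) * b + r * b = ((i - r) + r) * b := by ring
              _ = i * b := by rw [this]
          omega
        · rw [hoff] at hhi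
          have hmin : min (i+1) r = r := by omega
          have e0 : r * (b+1) = r * b + r := by ring
          have e1 : (i - r + 1) * b + r * b = (i+1) * b := by
            have : (i - r + 1) + r = i + 1 := by omega
            calc (i - r + 1) * b + r * b = ((i - r + 1) + r) * b := by ring
              _ = (i+1) * b := by rw [this]
          omega
      omega

-- the Int index computed by the port equals pvF, elementwise
theorem pvIdx_eq (n s j : Nat) :
    (if (0 + (j : Int)) < ((n % s : Nat) : Int) * (((n / s : Nat) : Int) + 1)
       then PySem.Int.floordiv (0 + (j : Int)) (((n / s : Nat) : Int) + 1)
       else ((n % s : Nat) : Int) +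
         PySem.Int.floordiv ((0 + (j : Int)) - ((n % s : Nat) : Int) * (((n / s : Nat) : Int) + 1))
           ((n / s : Nat) : Int)).toNat = pvF n s j := by
  have hc : ((n % s : Nat) : Int) * (((n / s : Nat) : Int) + 1) = ((n % s * (n / s + 1) : Nat) : Int) := by
    push_cast; ring
  rw [hc]
  unfold pvF
  have hz : (0 : Int) + (j : Int) = ((j : Nat) : Int) := by ring
  rw [hz]
  by_cases h : j < n % s * (n / s + 1)
  · rw [if_pos (by exact_mod_cast h), if_pos h]
    have h1 : (((n / s : Nat) : Int) + 1) = ((n / s + 1 : Nat) : Int) := by push_cast; ring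
    rw [h1, PySem.Int.floordiv_natCast]
    exact Int.toNat_natCast _
  · rw [if_neg (by exact_mod_cast h), if_neg h]
    have h2 : ((j : Nat) : Int) - ((n % s * (n / s + 1) : Nat) : Int)
        = ((j - n % s * (n / s + 1) : Nat) : Int) := by
      have : n % s * (n / s + 1) ≤ j := by omega
      push_cast [this]; ring
    rw [h2, PySem.Int.floordiv_natCast]
    have h3 : ((n % s : Nat) : Int) + (((j - n % s * (n / s + 1)) / (n / s) : Nat) : Int)
        = ((n % s + (j - n % s * (n / s + 1)) / (n / s) : Nat) : Int) := by push_cast; ring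
    rw [h3]
    exact Int.toNat_natCast _

theorem pvB_eq_spec (xs : List String) (s : Nat) (hs : 0 < s) :
    split_phrases_py_alt xs (s : Int) = pvSpec xs s := by
  have hns : ¬ ((s:Int) ≤ 0) := by omega
  simp only [split_phrases_py_alt, if_neg hns, PySem.Int.floordiv_natCast, PySem.Int.mod_natCast,
    PySem.List.enumerate_eq_zipIdx_map, List.foldl_map]
  have hstep : (fun (batches : List (List String)) (y : String × Nat) =>
      List.modify batches
        (if (0 + (y.2 : Int)) < ((xs.length % s : Nat) : Int) * (((xs.length / s : Nat) : Int) + 1)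
           then PySem.Int.floordiv (0 + (y.2 : Int)) (((xs.length / s : Nat) : Int) + 1)
           else ((xs.length % s : Nat) : Int) +
             PySem.Int.floordiv ((0 + (y.2 : Int)) - ((xs.length % s : Nat) : Int) * (((xs.length / s : Nat) : Int) + 1))
               ((xs.length / s : Nat) : Int)).toNat (fun b => b ++ [y.1]))
      = (fun (bs : List (List String)) (xp : String × Nat) =>
          bs.modify (pvF xs.length s xp.2) (fun b => b ++ [xp.1])) := by
    funext bs y
    rw [pvIdx_eq xs.length s y.2]
  rw [hstep]
  have hrange : PySem.List.pyRange 0 (s:Int) 1 = (List.range s).map (fun i => Int.ofNat i) := by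
    rw [PySem.List.pyRange_one]
    simp [Int.ofNat_eq_natCast]
  rw [hrange]
  set init := ((List.range s).map (fun i => Int.ofNat i)).map (fun _ => ([] : List String)) with hinit
  have hlen : init.length = s := by simp [hinit]
  apply List.ext_getElem
  · rw [pvFoldModify_len, hlen]
    simp [pvSpec]
  · intro i h1 h2
    have his : i < s := by rwa [pvFoldModify_len, hlen] at h1
    have hil : i < init.length := by omega
    rw [pvFoldModify (pvF xs.length s) xs.zipIdx init i hil]
    have hie : init[i] = ([] : List String) := by simp [hinit]
    rw [hie, List.nil_append]
    have hfc : (xs.zipIdx.filter (fun xp => pvF xs.length s xp.2 == i))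
        = xs.zipIdx.filter (fun xp =>
            decide (pvOff xs.length s i ≤ xp.2) && decide (xp.2 < pvOff xs.length s (i+1))) := by
      apply List.filter_congr
      intro xp hmem
      obtain ⟨x, j⟩ := xp
      obtain ⟨-, hlt, -⟩ := List.mem_zipIdx hmem
      have hj : j < xs.length := by omega
      have hb := pvBucket xs.length s j i hs hj his
      rw [Bool.eq_iff_iff]
      simp only [beq_iff_eq, Bool.and_eq_true, decide_eq_true_eq]
      exact hb
    rw [hfc, pvZipIdxFilter xs 0 (pvOff xs.length s i) (pvOff xs.length s (i+1))]
    simp [pvSpec]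

-- ===== VERDICT (by name: the statement is the Claim_ definition above) =====
theorem split_phrases_py_spec : Claim_equal_split_phrases_py := by
  intro phrases slots _
  unfold Spec_split_phrases_py
  by_cases h : slots ≤ 0
  · rw [split_phrases_py, split_phrases_py_alt, if_pos h, if_pos h]
  · have h1 : slots = ((slots.toNat : Nat) : Int) := by omega
    rw [h1, pvA_eq_spec' phrases slots.toNat (by omega), pvB_eq_spec phrases slots.toNat (by omega)]
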